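-- pv_equiv track=rewrite | github.com/ATIpiu/MyVibe | src/completer/file_completer.py | _highlight_match
-- ===== SOURCE A (Python) =====
-- def _highlight_match(text: str, prefix: str) -> str:
--     """在显示文本中高亮匹配部分。
--
--     Args:
--         text: 原始文本
--         prefix: 匹配前缀
--
--     Returns:
--         高亮后的文本（使用 ANSI 颜色）
--     """
--     if not prefix:
--         return text
--
--     # 简单实现：使用大写显示匹配部分
--     result = []
--     i = 0
--     text_lower = text.lower()
--
--     while i < len(text):
--         # 检查是否匹配前缀
--         if text_lower[i:i+len(prefix)] == prefix:
--             # 找到匹配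
--             result.append(text[i:i+len(prefix)])
--             i += len(prefix)
--         else:
--             result.append(text[i])
--             i += 1
--
--     return "".join(result)
-- ===== SOURCE B (Python) =====
-- def _highlight_match(text: str, prefix: str) -> str:
--     # Every branch of A appends the original characters unchanged, so the
--     # "highlighted" text is always identical to the input.
--     return text
-- ===== Notes on version B (the rewrite author's own statement) =====
-- stated objective: simpler
-- what changed: A's scan appends exactly the original characters on every branch and adds no highlighting, so B replaces the whole sliding-window loop with 'return text'.
import Mathlib
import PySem

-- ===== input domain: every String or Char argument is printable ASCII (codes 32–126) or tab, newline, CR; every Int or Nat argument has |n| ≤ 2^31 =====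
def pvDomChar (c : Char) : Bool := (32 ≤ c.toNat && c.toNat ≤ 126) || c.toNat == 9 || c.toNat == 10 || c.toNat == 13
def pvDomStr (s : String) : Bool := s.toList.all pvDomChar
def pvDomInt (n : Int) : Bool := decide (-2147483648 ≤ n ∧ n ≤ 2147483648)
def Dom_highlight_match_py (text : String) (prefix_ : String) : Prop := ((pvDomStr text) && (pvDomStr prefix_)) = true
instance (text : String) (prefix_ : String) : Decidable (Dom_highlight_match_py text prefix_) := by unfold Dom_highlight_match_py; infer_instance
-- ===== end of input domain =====

-- ===== PORT A =====
-- while-loop of A: i advances by len(prefix) on a match, else by 1; fuel bounds the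
-- number of iterations (each step consumes ≥ 1 fuel; fuel = len(text) suffices since
-- the loop is only entered with a nonempty prefix).
def hmLoop (t tl p : List Char) (i fuel : Nat) : List Char :=
  match fuel with
  | 0 => []
  | fuel + 1 =>
    if i < t.length then
      if (tl.drop i).take p.length = p then
        (t.drop i).take p.length ++ hmLoop t tl p (i + p.length) fuel
      else
        t.getD i ' ' :: hmLoop t tl p (i + 1) fuel
    else []

def highlight_match_py (text : String) (prefix_ : String) : String :=
  if prefix_.toList = [] then text
  else
    let t := text.toList
    let text_lower := PySem.Chars.lower t
    String.ofList (hmLoop t text_lower prefix_.toList 0 t.length)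

-- ===== PORT B =====
def highlight_match_py_alt (text : String) (prefix_ : String) : String := text

-- ===== PRECONDITION & SPEC =====
def Spec_highlight_match_py (text : String) (prefix_ : String) (out : String) : Prop := out = highlight_match_py_alt text prefix_
instance (text : String) (prefix_ : String) (out : String) : Decidable (Spec_highlight_match_py text prefix_ out) := by unfold Spec_highlight_match_py; infer_instance

-- ===== CLAIM (what is proved, stated in full; the proofs are below) =====
def Claim_equal_highlight_match_py : Prop := ∀ (text : String) (prefix_ : String), Dom_highlight_match_py text prefix_ → Spec_highlight_match_py text prefix_ (highlight_match_py text prefix_)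

-- ===== LEMMAS AND PROOFS =====

-- Both branches of the loop append exactly the characters of t from position i on.
theorem hmLoop_eq_drop (t tl p : List Char) (hp : p ≠ []) :
    ∀ (fuel i : Nat), t.length ≤ i + fuel → hmLoop t tl p i fuel = t.drop i := by
  intro fuel
  induction fuel with
  | zero =>
    intro i h
    simp [hmLoop, List.drop_eq_nil_of_le (by omega : t.length ≤ i)]
  | succ fuel ih =>
    intro i h
    have hplen : 1 ≤ p.length := by
      cases p with
      | nil => exact absurd rfl hp
      | cons a l => simp
    by_cases hi : i < t.length
    · by_cases hm : (tl.drop i).take p.length = p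
      · rw [hmLoop, if_pos hi, if_pos hm, ih (i + p.length) (by omega)]
        rw [← List.drop_drop, List.take_append_drop]
      · rw [hmLoop, if_neg hm, if_pos hi, ih (i + 1) (by omega)]
        rw [List.getD_eq_getElem t ' ' hi, ← List.drop_eq_getElem_cons hi]
    · simp [hmLoop, hi, List.drop_eq_nil_of_le (by omega : t.length ≤ i)]

-- ===== VERDICT (by name: the statement is the Claim_ definition above) =====
theorem highlight_match_py_spec : Claim_equal_highlight_match_py := by
  intro text prefix_ _
  unfold Spec_highlight_match_py highlight_match_py highlight_match_py_alt
  by_cases hp : prefix_.toList = []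
  · simp [hp]
  · rw [if_neg hp]
    show String.ofList (hmLoop text.toList (PySem.Chars.lower text.toList) prefix_.toList 0 text.toList.length) = text
    rw [hmLoop_eq_drop _ _ _ hp text.toList.length 0 (by omega)]
    simp [String.ofList_toList]
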